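-- pv_equiv track=rewrite | github.com/SaturnFromTitan/advent_of_code | 2023/day14/part1.py | score_column
-- ===== SOURCE A (Python) =====
-- def score_column(column: list[str]) -> int:
--     stone_position = -1
--     score = 0
--     for index, char in enumerate(column):
--         if char == "#":
--             stone_position = index
--         elif char == "O":
--             score += len(column) - stone_position - 1
--             stone_position += 1
--     return score
-- ===== SOURCE B (Python) =====
-- def score_column(column: list[str]) -> int:
--     n = len(column)
--     total = 0
--     start = 0  # top free index of the current segment
--     count = 0  # 'O' rocks in the current segment
--     for i, ch in enumerate(column):
--         if ch == "#":
--             total += count * (n - start) - count * (count - 1) // 2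
--             start = i + 1
--             count = 0
--         elif ch == "O":
--             count += 1
--     total += count * (n - start) - count * (count - 1) // 2
--     return total
-- ===== Notes on version B (the rewrite author's own statement) =====
-- stated objective: alternative
-- what changed: B sums each maximal '#'-delimited segment's load in closed form (c*(n-start) - c*(c-1)//2) instead of adding every rock's load individually while tracking the last occupied position.
import Mathlib
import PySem

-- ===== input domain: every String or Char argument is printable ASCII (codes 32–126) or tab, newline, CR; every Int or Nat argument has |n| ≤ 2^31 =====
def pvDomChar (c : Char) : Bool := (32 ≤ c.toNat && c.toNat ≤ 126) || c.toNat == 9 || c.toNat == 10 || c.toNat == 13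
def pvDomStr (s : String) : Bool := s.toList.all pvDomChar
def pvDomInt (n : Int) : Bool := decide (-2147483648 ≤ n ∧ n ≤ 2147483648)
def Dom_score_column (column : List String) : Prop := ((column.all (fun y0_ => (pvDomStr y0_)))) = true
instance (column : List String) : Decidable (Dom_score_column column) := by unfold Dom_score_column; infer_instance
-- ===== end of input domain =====

-- B sums each maximal '#'-delimited segment's rock load in closed form instead of per-rock accumulation (alternative decomposition, same O(n) cost).


-- ===== PORT A =====
-- state: (stone_position, score)
def score_column (column : List String) : Int :=
  let n : Int := column.length
  let st := (PySem.List.enumerate column).foldl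
    (fun (s : Int × Int) p =>
      if p.2 = "#" then (p.1, s.2)
      else if p.2 = "O" then (s.1 + 1, s.2 + (n - s.1 - 1))
      else s)
    (-1, 0)
  st.2

-- ===== PORT B =====
-- state: (start, count, total)
def score_column_alt (column : List String) : Int :=
  let n : Int := column.length
  let st := (PySem.List.enumerate column).foldl
    (fun (s : Int × Int × Int) p =>
      if p.2 = "#" then
        (p.1 + 1, 0, s.2.2 + (s.2.1 * (n - s.1) - PySem.Int.floordiv (s.2.1 * (s.2.1 - 1)) 2))
      else if p.2 = "O" then (s.1, s.2.1 + 1, s.2.2)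
      else s)
    (0, 0, 0)
  st.2.2 + (st.2.1 * (n - st.1) - PySem.Int.floordiv (st.2.1 * (st.2.1 - 1)) 2)

-- ===== PRECONDITION & SPEC =====
def Spec_score_column (column : List String) (out : Int) : Prop := out = score_column_alt column
instance (column : List String) (out : Int) : Decidable (Spec_score_column column out) := by unfold Spec_score_column; infer_instance

-- ===== CLAIM (what is proved, stated in full; the proofs are below) =====
def Claim_equal_score_column : Prop := ∀ (column : List String), Dom_score_column column → Spec_score_column column (score_column column)

-- ===== LEMMAS AND PROOFS =====

-- triangular-number step: (c+1)*c // 2 = c*(c-1) // 2 + c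
theorem pv_tri_step (c : Int) :
    PySem.Int.floordiv ((c + 1) * c) 2 = PySem.Int.floordiv (c * (c - 1)) 2 + c := by
  obtain ⟨k, hk⟩ : ∃ k : Int, c * (c - 1) = 2 * k := by
    rcases Int.even_or_odd c with ⟨m, hm⟩ | ⟨m, hm⟩
    · exact ⟨m * (c - 1), by rw [hm]; ring⟩
    · exact ⟨c * m, by rw [hm]; ring⟩
  have h2 : (c + 1) * c = 2 * (k + c) := by
    have hx : (c + 1) * c = c * (c - 1) + 2 * c := by ring
    omega
  rw [hk, h2]
  rw [PySem.Int.floordiv_eq_ediv_of_pos (by norm_num), PySem.Int.floordiv_eq_ediv_of_pos (by norm_num)]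
  omega

-- loop invariant: A's (stone_position, score) vs B's (start, count, total)
theorem pv_loop (n : Int) (l : List (Int × String)) (start count total : Int)
    (hc : 0 ≤ count) :
    (l.foldl
      (fun (s : Int × Int) p =>
        if p.2 = "#" then (p.1, s.2)
        else if p.2 = "O" then (s.1 + 1, s.2 + (n - s.1 - 1))
        else s)
      (start + count - 1, total + (count * (n - start) - PySem.Int.floordiv (count * (count - 1)) 2))).2
    =
    (fun (s : Int × Int × Int) =>
      s.2.2 + (s.2.1 * (n - s.1) - PySem.Int.floordiv (s.2.1 * (s.2.1 - 1)) 2))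
    (l.foldl
      (fun (s : Int × Int × Int) p =>
        if p.2 = "#" then
          (p.1 + 1, 0, s.2.2 + (s.2.1 * (n - s.1) - PySem.Int.floordiv (s.2.1 * (s.2.1 - 1)) 2))
        else if p.2 = "O" then (s.1, s.2.1 + 1, s.2.2)
        else s)
      (start, count, total)) := by
  induction l generalizing start count total with
  | nil => simp
  | cons p tl ih =>
    by_cases h1 : p.2 = "#"
    · simp only [List.foldl_cons, h1]
      have := ih (p.1 + 1) 0 (total + (count * (n - start) - PySem.Int.floordiv (count * (count - 1)) 2)) le_rfl
      simpa using this
    · by_cases h2 : p.2 = "O"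
      · simp only [List.foldl_cons, h2]
        have hpair : (start + count - 1 + 1,
            total + (count * (n - start) - PySem.Int.floordiv (count * (count - 1)) 2)
              + (n - (start + count - 1) - 1))
            = (start + (count + 1) - 1,
            total + ((count + 1) * (n - start)
              - PySem.Int.floordiv ((count + 1) * ((count + 1) - 1)) 2)) := by
          have ht := pv_tri_step count
          rw [Prod.mk.injEq]
          refine ⟨by ring, ?_⟩
          rw [show (count + 1) * ((count + 1) - 1) = (count + 1) * count from by ring, ht]
          ring
        rw [hpair]
        exact ih start (count + 1) total (by omega)
      · simp only [List.foldl_cons, h1, h2, ite_false]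
        exact ih start count total hc

-- ===== VERDICT (by name: the statement is the Claim_ definition above) =====
theorem score_column_spec : Claim_equal_score_column := by
  intro column _
  unfold Spec_score_column score_column score_column_alt
  have := pv_loop (column.length : Int) (PySem.List.enumerate column) 0 0 0 le_rfl
  simpa using this
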